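-- pv_equiv track=rewrite | github.com/DSIMB/PoincareMSA | scripts/prepare_data/compute_weight_sequence-py3.py | filter_ali_onlycar
-- ===== SOURCE A (Python) =====
-- def only_car_in_alipos(ali, pos, car):
--     """ Returns trus if ali contains only car in position pos """
--     for i in ali:
--         if i[pos] != car:
--             return False
--     return True
--
-- def filter_ali_onlycar(ali, car):
--     """ Remove positions of alignment containing only car """
--     handled_pos = [i for i in range(len(ali[0])) if not only_car_in_alipos(ali, i, car)]
--     filtered_ali = []
--     for i in range(len(ali)):
--         filtered_seq = ''
--         for j in handled_pos:
--             filtered_seq += ali[i][j]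
--         filtered_ali.append(filtered_seq)
--     return filtered_ali
-- ===== SOURCE B (Python) =====
-- def filter_ali_onlycar(ali, car):
--     """ Remove positions of alignment containing only car """
--     out = [''] * len(ali)
--     for j in range(len(ali[0])):
--         col = [s[j] for s in ali]
--         if col.count(car) < len(ali):
--             out = [o + c for o, c in zip(out, col)]
--     return out
-- ===== Notes on version B (the rewrite author's own statement) =====
-- stated objective: alternative
-- what changed: B makes a single column-major sweep: for each position it extracts the column, tests 'all car' by counting occurrences, and immediately appends the surviving column to per-row string accumulators, instead of A's two-phase scheme that first computes the list of kept indices and then gathers each row by indexing.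
import Mathlib
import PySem

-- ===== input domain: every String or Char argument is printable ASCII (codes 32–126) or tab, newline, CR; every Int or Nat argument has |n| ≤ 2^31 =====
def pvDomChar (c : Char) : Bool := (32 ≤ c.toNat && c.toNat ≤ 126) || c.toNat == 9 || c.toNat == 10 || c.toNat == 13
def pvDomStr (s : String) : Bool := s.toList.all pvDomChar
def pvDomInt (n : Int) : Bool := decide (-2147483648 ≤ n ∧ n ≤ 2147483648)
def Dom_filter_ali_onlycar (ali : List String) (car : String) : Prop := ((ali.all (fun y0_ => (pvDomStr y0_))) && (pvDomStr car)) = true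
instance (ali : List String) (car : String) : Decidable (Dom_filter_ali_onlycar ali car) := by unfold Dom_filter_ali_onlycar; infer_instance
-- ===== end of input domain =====

-- B replaces A's two-phase kept-index-then-gather scheme by a single column-major sweep with per-row accumulators and a count test (alternative decomposition, same cost).


-- ===== PORT A =====
-- 'i[pos] != car': i[pos] is a one-char string; none (IndexError) is unreachable inside Pre_, defaulted to []
def only_car_in_alipos (ali : List (List Char)) (pos : Int) (car : List Char) : Bool :=
  match ali with
  | [] => true
  | i :: rest =>
    if (((PySem.List.pyGet? i pos).map (fun c => [c])).getD []) ≠ car then false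
    else only_car_in_alipos rest pos car

def filter_ali_onlycar (ali : List String) (car : String) : List String :=
  let al := ali.map String.toList
  let c := car.toList
  let handled_pos := (PySem.List.pyRange 0 ((PySem.List.pyGetD al 0 []).length : Int) 1).filter
      (fun i => !(only_car_in_alipos al i c))
  let filtered_ali := (PySem.List.pyRange 0 (al.length : Int) 1).foldl
      (fun acc i =>
        acc ++ [handled_pos.foldl
          (fun s j => s ++ (((PySem.List.pyGet? (PySem.List.pyGetD al i []) j).map (fun ch => [ch])).getD [])) []])
      []
  filtered_ali.map String.ofList

-- ===== PORT B =====
-- single column-major sweep: per-row accumulators 'out', column kept iff col.count(car) < len(ali)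
def filter_ali_onlycar_alt (ali : List String) (car : String) : List String :=
  let al := ali.map String.toList
  let c := car.toList
  let out0 : List (List Char) := al.map (fun _ => ([] : List Char))
  let out := (PySem.List.pyRange 0 ((PySem.List.pyGetD al 0 []).length : Int) 1).foldl
      (fun out j =>
        let col := al.map (fun s => ((PySem.List.pyGet? s j).map (fun ch => [ch])).getD [])
        if PySem.List.count col c < al.length then
          (out.zip col).map (fun p => p.1 ++ p.2)
        else out)
      out0
  out.map String.ofList

-- ===== PRECONDITION & SPEC =====
-- A raises IndexError exactly when ali is empty or some sequence is shorter than ali[0].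
def Pre_filter_ali_onlycar (ali : List String) (car : String) : Prop :=
  ali ≠ [] ∧ ∀ s ∈ ali, (ali.headD "").toList.length ≤ s.toList.length
instance (ali : List String) (car : String) : Decidable (Pre_filter_ali_onlycar ali car) := by
  unfold Pre_filter_ali_onlycar; infer_instance

def pvWitness_filter_ali_onlycar : List String × String := (["a-b", "--b", "acb"], "-")

def Spec_filter_ali_onlycar (ali : List String) (car : String) (out : List String) : Prop := out = filter_ali_onlycar_alt ali car
instance (ali : List String) (car : String) (out : List String) : Decidable (Spec_filter_ali_onlycar ali car out) := by unfold Spec_filter_ali_onlycar; infer_instance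

-- ===== CLAIM (what is proved, stated in full; the proofs are below) =====
def Claim_equal_filter_ali_onlycar : Prop := ∀ (ali : List String) (car : String), Dom_filter_ali_onlycar ali car → Pre_filter_ali_onlycar ali car → Spec_filter_ali_onlycar ali car (filter_ali_onlycar ali car)

-- ===== LEMMAS AND PROOFS =====

-- canonical description: keep positions j of the first row's range where some row differs from car
def pvChar (s : List Char) (j : Nat) : Char := s.getD j ' '
def pvKeep (al : List (List Char)) (c : List Char) (j : Nat) : Bool := al.any (fun s => [pvChar s j] ≠ c)
def pvJs (al : List (List Char)) (c : List Char) : List Nat := (List.range (al.headD []).length).filter (pvKeep al c)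

def pvCanon (al : List (List Char)) (c : List Char) : List (List Char) :=
  al.map (fun s => (pvJs al c).map (pvChar s))

lemma oc_eq (al : List (List Char)) (c : List Char) (j : Nat) (h : ∀ s ∈ al, j < s.length) :
    only_car_in_alipos al (j : Int) c = !(al.any (fun s => [pvChar s j] ≠ c)) := by
  induction al with
  | nil => rfl
  | cons i rest ih =>
    have hj : j < i.length := h i (by simp)
    rw [only_car_in_alipos]
    rw [PySem.List.pyGet?_natCast, List.getElem?_eq_getElem hj]
    simp only [List.any_cons, pvChar, List.getD_eq_getElem i ' ' hj]
    split_ifs with hc <;> simp only [Option.map_some, Option.getD_some] at hc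
    · simp [hc]
    · rw [ih (fun s hs => h s (by simp [hs]))]
      simp [hc, pvChar, List.getD]

lemma pv_getD0 (al : List (List Char)) : PySem.List.pyGetD al 0 [] = al.headD [] := by
  cases al with
  | nil => rfl
  | cons a t => simp [PySem.List.pyGetD]

lemma pv_filter_cast (l : List Nat) (p : Int → Bool) (q : Nat → Bool)
    (hq : ∀ j ∈ l, p (j : Int) = q j) :
    List.filter p (List.map (fun k : Nat => (k : Int)) l)
      = List.map (fun k : Nat => (k : Int)) (List.filter q l) := by
  induction l with
  | nil => rfl
  | cons a t ih =>
    rw [List.map_cons, List.filter_cons, List.filter_cons, hq a (by simp),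
        ih (fun x hx => hq x (by simp [hx]))]
    by_cases hqa : q a = true
    · simp [hqa]
    · simp [hqa]

lemma handled_eq (al : List (List Char)) (c : List Char)
    (h : ∀ s ∈ al, (al.headD []).length ≤ s.length) :
    (PySem.List.pyRange 0 ((PySem.List.pyGetD al 0 []).length : Int) 1).filter
      (fun i => !(only_car_in_alipos al i c))
      = List.map (fun k : Nat => (k : Int)) (pvJs al c) := by
  rw [pv_getD0, PySem.List.pyRange_zero_natCast]
  unfold pvJs
  apply pv_filter_cast
  intro j hj
  have hjn : j < (al.headD []).length := List.mem_range.mp hj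
  rw [oc_eq al c j (fun s hs => lt_of_lt_of_le hjn (h s hs))]
  simp [pvKeep]

lemma row_eq (s : List Char) (js : List Nat) (h : ∀ j ∈ js, j < s.length) (acc : List Char) :
    (List.map (fun k : Nat => (k : Int)) js).foldl
      (fun a j => a ++ ((PySem.List.pyGet? s j).map (fun ch => [ch])).getD []) acc
      = acc ++ js.map (pvChar s) := by
  induction js generalizing acc with
  | nil => simp
  | cons j t ih =>
    have hj : j < s.length := h j (by simp)
    rw [List.map_cons, List.foldl_cons, PySem.List.pyGet?_natCast, List.getElem?_eq_getElem hj]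
    rw [ih (fun x hx => h x (by simp [hx]))]
    simp [pvChar, List.getD, List.getElem?_eq_getElem hj]

lemma pv_headD_map (ali : List String) :
    (ali.map String.toList).headD [] = (ali.headD "").toList := by
  cases ali <;> rfl

lemma A_canon (ali : List String) (car : String)
    (h : ∀ s ∈ ali, (ali.headD "").toList.length ≤ s.toList.length) :
    filter_ali_onlycar ali car
      = (pvCanon (ali.map String.toList) car.toList).map String.ofList := by
  have hal : ∀ s ∈ ali.map String.toList,
      ((ali.map String.toList).headD []).length ≤ s.length := by
    intro s hs
    obtain ⟨x, hx, rfl⟩ := List.mem_map.mp hs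
    rw [pv_headD_map]
    exact h x hx
  simp only [filter_ali_onlycar]
  rw [handled_eq _ _ hal]
  rw [show ((ali.map String.toList).length : Int) = (((ali.map String.toList)).length : Int) from rfl]
  rw [PySem.List.foldl_pyRange_zero_pyGetD' (ali.map String.toList) []
      (fun acc x => acc ++ [(List.map (fun k : Nat => (k : Int)) (pvJs (ali.map String.toList) car.toList)).foldl
        (fun s j => s ++ ((PySem.List.pyGet? x j).map (fun ch => [ch])).getD []) []]) []]
  rw [PySem.List.foldl_append_singleton_eq_map]
  unfold pvCanon
  rw [List.nil_append]
  congr 1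
  apply List.map_congr_left
  intro s hs
  rw [row_eq]
  · simp
  · intro j hj
    unfold pvJs at hj
    have : j < ((ali.map String.toList).headD []).length :=
      List.mem_range.mp (List.mem_filter.mp hj).1
    exact lt_of_lt_of_le this (hal s hs)

-- the column at an in-range position j is the list of singleton strings [pvChar s j]
lemma col_eq (al : List (List Char)) (j : Nat) (h : ∀ s ∈ al, j < s.length) :
    al.map (fun s => ((PySem.List.pyGet? s (j : Int)).map (fun ch => [ch])).getD [])
      = al.map (fun s => [pvChar s j]) := by
  apply List.map_congr_left
  intro s hs
  have hj : j < s.length := h s hs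
  simp [PySem.List.pyGet?_natCast, List.getElem?_eq_getElem hj, pvChar, List.getD]

-- the count test detects exactly the kept columns
lemma count_lt_iff (al : List (List Char)) (c : List Char) (j : Nat) :
    PySem.List.count (al.map (fun s => [pvChar s j])) c < al.length ↔ pvKeep al c j = true := by
  rw [PySem.List.count_eq]
  have hlen : (al.map (fun s => [pvChar s j])).length = al.length := List.length_map _
  constructor
  · intro hlt
    by_contra hk
    have hall : ∀ x ∈ al.map (fun s => [pvChar s j]), c = x := by
      intro x hx
      obtain ⟨s, hs, rfl⟩ := List.mem_map.mp hx
      have := List.any_eq_false.mp (Bool.not_eq_true _ ▸ hk) s hs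
      have h2 : [pvChar s j] = c := by simpa using this
      exact h2.symm
    have hcnt := List.count_eq_length.mpr hall
    rw [hcnt, hlen] at hlt
    exact lt_irrefl _ hlt
  · intro hk
    obtain ⟨s, hs, hne⟩ := List.any_eq_true.mp hk
    have hne' : ([pvChar s j] : List Char) ≠ c := by simpa using hne
    have hle : (al.map (fun s => [pvChar s j])).count c ≤ al.length :=
      hlen ▸ List.count_le_length
    rcases lt_or_eq_of_le hle with hlt | heq
    · exact hlt
    · exfalso
      have hall := List.count_eq_length.mp (heq.trans hlen.symm)
      exact hne' (hall [pvChar s j] (List.mem_map_of_mem hs)).symm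

-- loop invariant: sweeping positions js extends each row's accumulator by the kept positions of js
lemma fold_cols (al : List (List Char)) (c : List Char) (js : List Nat)
    (h : ∀ j ∈ js, ∀ s ∈ al, j < s.length) (acc : List Nat) :
    js.foldl
      (fun out (j : Nat) =>
        let col := al.map (fun s => ((PySem.List.pyGet? s (j : Int)).map (fun ch => [ch])).getD [])
        if PySem.List.count col c < al.length then
          (out.zip col).map (fun p => p.1 ++ p.2)
        else out)
      (al.map (fun s => acc.map (pvChar s)))
      = al.map (fun s => (acc ++ js.filter (pvKeep al c)).map (pvChar s)) := by
  induction js generalizing acc with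
  | nil => simp
  | cons j t ih =>
    rw [List.foldl_cons]
    simp only
    rw [col_eq al j (h j (by simp)), List.filter_cons]
    by_cases hk : pvKeep al c j = true
    · rw [if_pos ((count_lt_iff al c j).mpr hk)]
      have hzip : ((al.map (fun s => acc.map (pvChar s))).zip (al.map (fun s => [pvChar s j]))).map
            (fun p => p.1 ++ p.2)
          = al.map (fun s => (acc ++ [j]).map (pvChar s)) := by
        rw [List.zip_map', List.map_map]
        apply List.map_congr_left
        intro s _
        simp [Function.comp]
      rw [hzip, ih (fun x hx => h x (by simp [hx])) (acc ++ [j])]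
      simp [hk]
    · rw [if_neg (fun hc => hk ((count_lt_iff al c j).mp hc))]
      rw [ih (fun x hx => h x (by simp [hx])) acc]
      simp [hk]

lemma B_canon (ali : List String) (car : String)
    (h : ∀ s ∈ ali, (ali.headD "").toList.length ≤ s.toList.length) :
    filter_ali_onlycar_alt ali car
      = (pvCanon (ali.map String.toList) car.toList).map String.ofList := by
  have hal : ∀ s ∈ ali.map String.toList,
      ((ali.map String.toList).headD []).length ≤ s.length := by
    intro s hs
    obtain ⟨x, hx, rfl⟩ := List.mem_map.mp hs
    rw [pv_headD_map]
    exact h x hx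
  simp only [filter_ali_onlycar_alt]
  rw [pv_getD0, PySem.List.pyRange_zero_natCast, List.foldl_map]
  have h0 : (ali.map String.toList).map (fun _ => ([] : List Char))
      = (ali.map String.toList).map (fun s => ([] : List Nat).map (pvChar s)) := by
    simp
  rw [h0, fold_cols (ali.map String.toList) car.toList
        (List.range ((ali.map String.toList).headD []).length)
        (fun j hj s hs => lt_of_lt_of_le (List.mem_range.mp hj) (hal s hs)) []]
  unfold pvCanon pvJs
  simp

-- ===== VERDICT (by name: the statement is the Claim_ definition above) =====
theorem filter_ali_onlycar_spec : Claim_equal_filter_ali_onlycar := by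
  intro ali car _ hpre
  unfold Spec_filter_ali_onlycar
  rw [A_canon ali car hpre.2, B_canon ali car hpre.2]
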